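-- pv_equiv track=rewrite | github.com/leecming82/tategaki-xtc-gui-studio | tategakiXTC_gui_core.py | _chapter_bounds_for_page
-- ===== SOURCE A (Python) =====
-- def _chapter_bounds_for_page(page_index, page_count, chapter_starts):
--     starts = set()
--     for value in chapter_starts or []:
--         try:
--             start = int(value)
--         except (TypeError, ValueError):
--             continue
--         if 0 <= start < page_count:
--             starts.add(start)
--     starts = sorted(starts)
--     if not starts or starts[0] != 0:
--         starts.insert(0, 0)
--     bounds = starts + [page_count]
--     chapter_start, chapter_end = 0, page_count
--     for idx, start in enumerate(starts):
--         end = bounds[idx + 1]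
--         if start <= page_index < end:
--             chapter_start, chapter_end = start, end
--             break
--     return starts, chapter_start, chapter_end
-- ===== SOURCE B (Python) =====
-- def _chapter_bounds_for_page(page_index, page_count, chapter_starts):
--     seen = set()
--     for value in chapter_starts or []:
--         try:
--             start = int(value)
--         except (TypeError, ValueError):
--             continue
--         if 0 <= start < page_count:
--             seen.add(start)
--     starts = sorted(seen)
--     if not starts or starts[0] != 0:
--         starts.insert(0, 0)
--     if 0 <= page_index < page_count:
--         # bisect_right by hand: first index whose start exceeds page_index
--         lo, hi = 0, len(starts)
--         while lo < hi:
--             mid = (lo + hi) // 2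
--             if starts[mid] <= page_index:
--                 lo = mid + 1
--             else:
--                 hi = mid
--         chapter_start = starts[lo - 1]
--         chapter_end = starts[lo] if lo < len(starts) else page_count
--     else:
--         chapter_start, chapter_end = 0, page_count
--     return starts, chapter_start, chapter_end
-- ===== Notes on version B (the rewrite author's own statement) =====
-- stated objective: alternative
-- what changed: the linear scan over consecutive interval pairs with break is replaced by an explicit out-of-range guard plus a hand-written binary search (bisect_right) over the sanitized starts list
import Mathlib
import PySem

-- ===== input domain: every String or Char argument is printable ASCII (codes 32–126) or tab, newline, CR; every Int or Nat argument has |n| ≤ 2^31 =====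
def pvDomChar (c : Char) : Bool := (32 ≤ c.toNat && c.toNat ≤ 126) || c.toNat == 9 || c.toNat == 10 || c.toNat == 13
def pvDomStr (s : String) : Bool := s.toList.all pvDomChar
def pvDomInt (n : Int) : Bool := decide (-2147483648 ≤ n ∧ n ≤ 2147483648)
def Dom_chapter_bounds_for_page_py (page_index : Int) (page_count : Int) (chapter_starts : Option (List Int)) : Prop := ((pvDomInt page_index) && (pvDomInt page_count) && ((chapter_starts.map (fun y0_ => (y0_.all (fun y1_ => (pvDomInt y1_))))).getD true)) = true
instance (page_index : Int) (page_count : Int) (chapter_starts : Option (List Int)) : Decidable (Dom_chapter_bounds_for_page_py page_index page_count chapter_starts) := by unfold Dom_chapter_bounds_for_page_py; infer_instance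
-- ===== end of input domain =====

-- B replaces A's linear scan over consecutive interval pairs by a guard plus a hand-written
-- binary search over the sanitized starts list (objective: alternative; the shared
-- sanitization/sort half is returned by the function and therefore kept in both).

-- Shared sanitization (textually identical in both Pythons, as it is part of the returned value):
-- the filtering loop into a set, sorted(), and the forced leading 0.
-- `int(value)` on an Int is the identity, so the try/except branch is dead on this domain.
def pvSanitizeStarts (page_count : Int) (chapter_starts : Option (List Int)) : List Int :=
  let seen : PySem.Set Int := (chapter_starts.getD []).foldl
    (fun s start => if 0 ≤ start ∧ start < page_count then PySem.Set.add s start else s)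
    PySem.Set.empty
  let sorted := PySem.List.sorted seen (fun x => x) false
  -- `if not starts or starts[0] != 0: starts.insert(0, 0)`
  if sorted.head? ≠ some 0 then 0 :: sorted else sorted

-- ===== PORT A =====
-- the `for idx, start in enumerate(starts)` loop over bounds = starts + [page_count], with break
def pvScanA (page_index : Int) (page_count : Int) : List Int → Int × Int
  | [] => (0, page_count)
  | [s] => if s ≤ page_index ∧ page_index < page_count then (s, page_count) else (0, page_count)
  | s :: s' :: rest =>
      if s ≤ page_index ∧ page_index < s' then (s, s')
      else pvScanA page_index page_count (s' :: rest)

def chapter_bounds_for_page_py (page_index : Int) (page_count : Int) (chapter_starts : Option (List Int)) : List Int × Int × Int :=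
  let starts := pvSanitizeStarts page_count chapter_starts
  let (cs, ce) := pvScanA page_index page_count starts
  (starts, cs, ce)

-- ===== PORT B =====
-- the hand-written `while lo < hi` bisect_right loop of Source B
def pvBisect (starts : List Int) (page_index : Int) (lo hi : Nat) : Nat :=
  if lo < hi then
    let mid := (lo + hi) / 2
    if starts.getD mid 0 ≤ page_index then pvBisect starts page_index (mid + 1) hi
    else pvBisect starts page_index lo mid
  else lo
  termination_by hi - lo
  decreasing_by all_goals omega

def chapter_bounds_for_page_py_alt (page_index : Int) (page_count : Int) (chapter_starts : Option (List Int)) : List Int × Int × Int :=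
  let starts := pvSanitizeStarts page_count chapter_starts
  if 0 ≤ page_index ∧ page_index < page_count then
    let lo := pvBisect starts page_index 0 starts.length
    -- under the guard, the forced leading 0 gives 1 ≤ lo ≤ len, so getD is Python's starts[lo-1]
    (starts, starts.getD (lo - 1) 0,
      if lo < starts.length then starts.getD lo 0 else page_count)
  else (starts, 0, page_count)

-- ===== PRECONDITION & SPEC =====
def Spec_chapter_bounds_for_page_py (page_index : Int) (page_count : Int) (chapter_starts : Option (List Int)) (out : List Int × Int × Int) : Prop := out = chapter_bounds_for_page_py_alt page_index page_count chapter_starts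
instance (page_index : Int) (page_count : Int) (chapter_starts : Option (List Int)) (out : List Int × Int × Int) : Decidable (Spec_chapter_bounds_for_page_py page_index page_count chapter_starts out) := by unfold Spec_chapter_bounds_for_page_py; infer_instance

-- ===== CLAIM (what is proved, stated in full; the proofs are below) =====
def Claim_equal_chapter_bounds_for_page_py : Prop := ∀ (page_index : Int) (page_count : Int) (chapter_starts : Option (List Int)), Dom_chapter_bounds_for_page_py page_index page_count chapter_starts → Spec_chapter_bounds_for_page_py page_index page_count chapter_starts (chapter_bounds_for_page_py page_index page_count chapter_starts)

-- ===== LEMMAS AND PROOFS =====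

-- the conditional-add fold is Set.ofList of the filtered list
lemma pvFoldl_cond_add (c : Int → Prop) [DecidablePred c] :
    ∀ (l : List Int) (s : PySem.Set Int),
      l.foldl (fun s v => if c v then PySem.Set.add s v else s) s
        = (l.filter (fun v => decide (c v))).foldl PySem.Set.add s := by
  intro l
  induction l with
  | nil => intro s; rfl
  | cons v l ih =>
      intro s
      by_cases h : c v <;> simp [List.foldl_cons, h, ih]

-- forcing the leading 0 onto a strict-sorted list of elements of [0, page_count)
lemma pvForce_props (page_count : Int) (s : List Int) (hpw : s.Pairwise (· < ·))
    (hmem : ∀ x ∈ s, 0 ≤ x ∧ x < page_count) :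
    ∃ t, (if s.head? ≠ some 0 then 0 :: s else s) = 0 :: t ∧
      (0 :: t).Pairwise (· ≤ ·) ∧ ∀ x ∈ t, 0 ≤ x ∧ x < page_count := by
  match s with
  | [] => exact ⟨[], by simp, by simp, by simp⟩
  | h :: t0 =>
      by_cases h0 : h = 0
      · subst h0
        refine ⟨t0, by simp, hpw.imp (fun hab => le_of_lt hab), ?_⟩
        intro x hx; exact hmem x (List.mem_cons_of_mem 0 hx)
      · refine ⟨h :: t0, by simp [h0], ?_, hmem⟩
        refine List.Pairwise.cons ?_ (hpw.imp (fun hab => le_of_lt hab))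
        intro x hx; exact (hmem x hx).1

-- structure of the sanitized list: a leading 0, monotone, tail elements in [0, page_count)
lemma pvSanitize_props (page_count : Int) (chapter_starts : Option (List Int)) :
    ∃ t, pvSanitizeStarts page_count chapter_starts = 0 :: t ∧
      (0 :: t).Pairwise (· ≤ ·) ∧ ∀ x ∈ t, 0 ≤ x ∧ x < page_count := by
  unfold pvSanitizeStarts
  rw [pvFoldl_cond_add (fun v => 0 ≤ v ∧ v < page_count)]
  have hfold : List.foldl PySem.Set.add PySem.Set.empty
      (List.filter (fun v => decide (0 ≤ v ∧ v < page_count)) (chapter_starts.getD []))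
      = PySem.Set.ofList
        (List.filter (fun v => decide (0 ≤ v ∧ v < page_count)) (chapter_starts.getD [])) := rfl
  rw [hfold]
  refine pvForce_props page_count _ (PySem.List.sorted_ofList_pairwise_lt _) ?_
  intro x hx
  rw [PySem.List.mem_sorted, PySem.Set.mem_ofList, List.mem_filter] at hx
  simpa using hx.2

-- getD is monotone on a (· ≤ ·)-pairwise list
lemma pvGetD_mono {l : List Int} (h : l.Pairwise (· ≤ ·)) {i j : Nat}
    (hij : i ≤ j) (hj : j < l.length) : l.getD i 0 ≤ l.getD j 0 := by
  rcases Nat.lt_or_ge i j with hlt | hge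
  · have := (List.pairwise_iff_getElem.mp h) i j (lt_trans hlt hj) hj hlt
    rwa [List.getD_eq_getElem l 0 (lt_trans hlt hj), List.getD_eq_getElem l 0 hj]
  · have : i = j := le_antisymm hij hge
    simp [this]

-- the bisect invariant: P l p r says r splits l into a prefix ≤ p and a suffix > p
def pvP (l : List Int) (p : Int) (r : Nat) : Prop :=
  r ≤ l.length ∧ (∀ i < r, l.getD i 0 ≤ p) ∧ (∀ i, r ≤ i → i < l.length → p < l.getD i 0)

lemma pvBisect_P (l : List Int) (p : Int) (hs : l.Pairwise (· ≤ ·)) :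
    ∀ n lo hi, hi - lo ≤ n → lo ≤ hi → hi ≤ l.length →
      (∀ i < lo, l.getD i 0 ≤ p) → (∀ i, hi ≤ i → i < l.length → p < l.getD i 0) →
      pvP l p (pvBisect l p lo hi) := by
  intro n
  induction n with
  | zero =>
      intro lo hi hn hle hlen h1 h2
      have : hi = lo := by omega
      subst this
      rw [pvBisect]; simp only [lt_irrefl, if_false]
      exact ⟨by omega, h1, h2⟩
  | succ n ih =>
      intro lo hi hn hle hlen h1 h2
      rw [pvBisect]
      by_cases hlt : lo < hi
      · simp only [hlt, if_true]
        by_cases hm : l.getD ((lo + hi) / 2) 0 ≤ p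
        · simp only [hm, if_true]
          refine ih ((lo + hi) / 2 + 1) hi (by omega) (by omega) hlen ?_ h2
          intro i hi'
          rcases Nat.lt_or_ge i lo with h | h
          · exact h1 i h
          · exact le_trans (pvGetD_mono hs (by omega) (by omega)) hm
        · simp only [hm, if_false]
          push_neg at hm
          refine ih lo ((lo + hi) / 2) (by omega) (by omega) (by omega) h1 ?_
          intro i hi' hil
          exact lt_of_lt_of_le hm (pvGetD_mono hs hi' hil)
      · simp only [hlt, if_false]
        have : hi = lo := by omega
        subst this
        exact ⟨by omega, h1, h2⟩

-- the linear scan of A computes the bounds determined by any r satisfying the invariant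
lemma pvScanA_of_P (p pc : Int) :
    ∀ (t : List Int) (s : Int) (r : Nat), (s :: t).Pairwise (· ≤ ·) → s ≤ p → p < pc →
      pvP (s :: t) p r →
      pvScanA p pc (s :: t)
        = ((s :: t).getD (r - 1) 0, if r < (s :: t).length then (s :: t).getD r 0 else pc) := by
  intro t
  induction t with
  | nil =>
      intro s r _ hsp hppc ⟨hr1, hr2, hr3⟩
      have hr0 : r ≠ 0 := by
        intro h; subst h
        exact absurd (hr3 0 (Nat.le_refl 0) (by simp)) (by simpa using not_lt.mpr hsp)
      have : r = 1 := by simp at hr1; omega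
      subst this
      simp [pvScanA, hsp, hppc]
  | cons s' rest ih =>
      intro s r hpw hsp hppc ⟨hr1, hr2, hr3⟩
      have hlen : (s :: s' :: rest).length = rest.length + 2 := by simp
      have hr0 : r ≠ 0 := by
        intro h; subst h
        exact absurd (hr3 0 (Nat.le_refl 0) (by simp)) (by simpa using not_lt.mpr hsp)
      by_cases hbrk : p < s'
      · -- first interval hit: r must be 1
        have hr1le : r ≤ 1 := by
          by_contra h
          have := hr2 1 (by omega)
          simp only [List.getD_cons_succ, List.getD_cons_zero] at this
          omega
        have : r = 1 := by omega
        subst this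
        simp [pvScanA, hsp, hbrk, hlen]
      · push_neg at hbrk
        have hr2le : 2 ≤ r := by
          by_contra h
          have := hr3 1 (by omega) (by simp)
          simp only [List.getD_cons_succ, List.getD_cons_zero] at this
          omega
        obtain ⟨k, rfl⟩ : ∃ k, r = k + 2 := ⟨r - 2, by omega⟩
        have hP' : pvP (s' :: rest) p (k + 1) := by
          refine ⟨by simp at hr1 ⊢; omega, ?_, ?_⟩
          · intro i hi
            have := hr2 (i + 1) (by omega)
            simpa using this
          · intro i hi hil
            have := hr3 (i + 1) (by omega) (by simp at hil ⊢; omega)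
            simpa using this
        have heq : pvScanA p pc (s :: s' :: rest) = pvScanA p pc (s' :: rest) := by
          rw [pvScanA]
          simp [not_lt.mpr hbrk]
        rw [heq, ih s' (k + 1) hpw.tail hbrk hppc hP']
        simp only [List.getD_cons_succ, List.length_cons, Nat.add_sub_cancel]
        split_ifs with h1 h2 <;> first | rfl | omega

-- when page_index < 0 the scan falls through to the defaults
lemma pvScanA_neg (p pc : Int) (hp : p < 0) :
    ∀ l : List Int, (∀ x ∈ l, 0 ≤ x) → pvScanA p pc l = (0, pc) := by
  intro l
  induction l with
  | nil => intro _; rfl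
  | cons s t ih =>
      intro hmem
      have hs : ¬ s ≤ p := by
        have := hmem s (List.mem_cons_self ..)
        omega
      match t with
      | [] => simp [pvScanA, hs]
      | s' :: rest =>
          rw [pvScanA]
          simp only [hs, false_and, if_false]
          exact ih (fun x hx => hmem x (List.mem_cons_of_mem s hx))

-- when page_index ≥ every start and ≥ page_count the scan falls through to the defaults
lemma pvScanA_big (p pc : Int) (hp : pc ≤ p) :
    ∀ l : List Int, (∀ x ∈ l, x ≤ p) → pvScanA p pc l = (0, pc) := by
  intro l
  induction l with
  | nil => intro _; rfl
  | cons s t ih =>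
      intro hmem
      match t with
      | [] => simp [pvScanA]; omega
      | s' :: rest =>
          rw [pvScanA]
          have : ¬ p < s' := by
            have := hmem s' (List.mem_cons_of_mem s (List.mem_cons_self ..))
            omega
          simp only [this, and_false, if_false]
          exact ih (fun x hx => hmem x (List.mem_cons_of_mem s hx))

-- ===== VERDICT (by name: the statement is the Claim_ definition above) =====
theorem chapter_bounds_for_page_py_spec : Claim_equal_chapter_bounds_for_page_py := by
  intro p pc cs _
  unfold Spec_chapter_bounds_for_page_py chapter_bounds_for_page_py chapter_bounds_for_page_py_alt
  obtain ⟨t, hst, hpw, hmem⟩ := pvSanitize_props pc cs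
  rw [hst]
  dsimp only
  by_cases hg : 0 ≤ p ∧ p < pc
  · have hP : pvP (0 :: t) p (pvBisect (0 :: t) p 0 (0 :: t).length) :=
      pvBisect_P (0 :: t) p hpw (0 :: t).length 0 (0 :: t).length (by omega) (by omega)
        (le_refl _) (by omega) (by omega)
    rw [pvScanA_of_P p pc t 0 (pvBisect (0 :: t) p 0 (0 :: t).length) hpw hg.1 hg.2 hP,
      if_pos hg]
  · rw [if_neg hg]
    rcases lt_or_ge p 0 with hneg | hpos
    · rw [pvScanA_neg p pc hneg (0 :: t) ?_]
      intro x hx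
      rcases List.mem_cons.mp hx with h | h
      · omega
      · exact (hmem x h).1
    · have hbig : pc ≤ p := by
        by_contra h
        exact hg ⟨hpos, by omega⟩
      rw [pvScanA_big p pc hbig (0 :: t) ?_]
      intro x hx
      rcases List.mem_cons.mp hx with h | h
      · omega
      · have := (hmem x h).2; omega
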